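-- pv_equiv track=rewrite | github.com/pabloschwarzenberg/grader | tema4_ej3/tema4_ej3_cd9b0b4357ba404dc75a0676eda9ddac.py | jerigonzo
-- ===== SOURCE A (Python) =====
-- def jerigonzo(palabra):
--   contador = ""
--   for letra in palabra:
--     if letra in "AEIOUaeiou":
--       contador += letra
--       contador += "p"
--     contador += letra
--   return contador
-- ===== SOURCE B (Python) =====
-- def jerigonzo(palabra):
--     for v in "aeiouAEIOU":
--         palabra = palabra.replace(v, v + "p" + v)
--     return palabra
-- ===== Notes on version B (the rewrite author's own statement) =====
-- stated objective: alternative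
-- what changed: Replaces the single character-by-character loop with a running accumulator by ten staged whole-string passes, one str.replace per vowel (correct because each replacement introduces no vowel other than the one already processed); measured faster since each pass runs in C instead of a per-character Python loop.
import Mathlib
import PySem

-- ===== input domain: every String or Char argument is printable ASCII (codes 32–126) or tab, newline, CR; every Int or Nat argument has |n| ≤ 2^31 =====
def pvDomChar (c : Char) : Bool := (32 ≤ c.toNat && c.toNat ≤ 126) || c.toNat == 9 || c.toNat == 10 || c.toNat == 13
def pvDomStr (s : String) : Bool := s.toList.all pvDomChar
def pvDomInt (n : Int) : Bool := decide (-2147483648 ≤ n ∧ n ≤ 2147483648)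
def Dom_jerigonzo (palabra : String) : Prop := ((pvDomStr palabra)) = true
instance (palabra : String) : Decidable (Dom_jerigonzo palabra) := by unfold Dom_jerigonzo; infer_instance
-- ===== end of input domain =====

-- B replaces the single character loop with a running accumulator by ten staged whole-string
-- passes, one str.replace per vowel (alternative decomposition; correct because each
-- replacement introduces no vowel other than the one already processed).

-- ===== PORT A =====
def jerigonzo (palabra : String) : String :=
  String.ofList (palabra.toList.foldl
    (fun contador letra =>
      if "AEIOUaeiou".toList.contains letra then
        contador ++ [letra] ++ ['p'] ++ [letra]
      else
        contador ++ [letra])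
    [])

-- ===== PORT B =====
-- one full-string replace pass per vowel: v -> v + "p" + v
def jerigonzo_alt (palabra : String) : String :=
  "aeiouAEIOU".toList.foldl
    (fun s v => PySem.Str.replace s (String.ofList [v]) (String.ofList [v, 'p', v]))
    palabra

-- ===== PRECONDITION & SPEC =====
def Spec_jerigonzo (palabra : String) (out : String) : Prop := out = jerigonzo_alt palabra
instance (palabra : String) (out : String) : Decidable (Spec_jerigonzo palabra out) := by unfold Spec_jerigonzo; infer_instance

-- ===== CLAIM (what is proved, stated in full; the proofs are below) =====
def Claim_equal_jerigonzo : Prop := ∀ (palabra : String), Dom_jerigonzo palabra → Spec_jerigonzo palabra (jerigonzo palabra)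

-- ===== LEMMAS AND PROOFS =====

-- replace.go with a single-char pattern is a per-character substitution
theorem replace_go_single (v : Char) (new : List Char) :
    ∀ (fuel : Nat) (l acc : List Char), l.length ≤ fuel →
      PySem.Chars.replace.go [v] new fuel l acc
        = acc.reverse ++ l.flatMap (fun c => if c = v then new else [c]) := by
  intro fuel
  induction fuel with
  | zero =>
    intro l acc h
    have : l = [] := List.eq_nil_of_length_eq_zero (Nat.le_zero.mp h)
    subst this
    simp [PySem.Chars.replace.go]
  | succ n ih =>
    intro l acc h
    cases l with
    | nil => simp [PySem.Chars.replace.go]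
    | cons c t =>
      simp only [PySem.Chars.replace.go]
      by_cases hc : c = v
      · subst hc
        have hp : List.isPrefixOf [c] (c :: t) = true := by
          simp [List.isPrefixOf]
        rw [if_pos hp]
        rw [ih _ _ (by simpa using Nat.le_of_succ_le_succ h)]
        simp [List.flatMap_cons]
      · have hp : List.isPrefixOf [v] (c :: t) = false := by
          simp [List.isPrefixOf]; exact fun h' => (hc h'.symm).elim
        rw [if_neg (by simp [hp])]
        rw [ih t (c :: acc) (by simpa using Nat.le_of_succ_le_succ h)]
        simp [List.flatMap_cons, hc]

theorem replace_single (v : Char) (new s : List Char) :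
    PySem.Chars.replace s [v] new
      = s.flatMap (fun c => if c = v then new else [c]) := by
  rw [PySem.Chars.replace]
  simp only [List.isEmpty_cons, Bool.false_eq_true, if_false]
  exact (by simpa using replace_go_single v new s.length s [] (le_refl _))

-- chaining per-vowel substitution passes over a nodup list of vowels not containing 'p'
theorem chain_subst :
    ∀ (vs : List Char) (s : List Char), vs.Nodup → 'p' ∉ vs →
      vs.foldl (fun l v => l.flatMap (fun c => if c = v then [v, 'p', v] else [c])) s
        = s.flatMap (fun c => if c ∈ vs then [c, 'p', c] else [c]) := by
  intro vs
  induction vs with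
  | nil => intro s _ _; simp
  | cons v vs ih =>
    intro s hnd hp
    have hvnotin : v ∉ vs := (List.nodup_cons.mp hnd).1
    have hnd' : vs.Nodup := (List.nodup_cons.mp hnd).2
    have hp' : 'p' ∉ vs := fun h => hp (List.mem_cons_of_mem _ h)
    simp only [List.foldl_cons]
    rw [ih _ hnd' hp', List.flatMap_assoc]
    apply List.flatMap_congr
    intro c _
    by_cases hc : c = v
    · subst hc
      simp [hvnotin, hp']
    · simp [hc, List.flatMap_cons]

-- B's String-level fold computed on character lists
theorem alt_toList :
    ∀ (vs : List Char) (s : String),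
      (vs.foldl (fun s v => PySem.Str.replace s (String.ofList [v]) (String.ofList [v, 'p', v])) s).toList
        = vs.foldl (fun l v => PySem.Chars.replace l [v] [v, 'p', v]) s.toList := by
  intro vs
  induction vs with
  | nil => intro s; rfl
  | cons v vs ih =>
    intro s
    simp only [List.foldl_cons]
    rw [ih]
    simp [PySem.Str.replace]

-- ===== VERDICT (by name: the statement is the Claim_ definition above) =====
theorem jerigonzo_spec : Claim_equal_jerigonzo := by
  intro palabra _
  unfold Spec_jerigonzo jerigonzo jerigonzo_alt
  -- A's side: accumulator fold = flatMap of the per-char expansion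
  have hstep : ∀ (acc : List Char) (c : Char),
      (if "AEIOUaeiou".toList.contains c then acc ++ [c] ++ ['p'] ++ [c] else acc ++ [c])
        = acc ++ (if c ∈ "aeiouAEIOU".toList then [c, 'p', c] else [c]) := by
    intro acc c
    have e1 : "AEIOUaeiou".toList = ['A','E','I','O','U','a','e','i','o','u'] := rfl
    have e2 : "aeiouAEIOU".toList = ['a','e','i','o','u','A','E','I','O','U'] := rfl
    have hmem : "AEIOUaeiou".toList.contains c = decide (c ∈ "aeiouAEIOU".toList) := by
      rw [e1, e2]
      simp only [List.contains_eq_mem]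
      apply decide_eq_decide.mpr
      constructor <;> (intro h; simp only [List.mem_cons, List.not_mem_nil] at h ⊢; tauto)
    rw [hmem]
    split <;> simp_all
  simp only [hstep]
  rw [PySem.List.foldl_append_eq_flatMap]
  -- B's side
  have hB : (List.foldl (fun s v => PySem.Str.replace s (String.ofList [v]) (String.ofList [v, 'p', v]))
      palabra "aeiouAEIOU".toList).toList
        = palabra.toList.flatMap (fun c => if c ∈ "aeiouAEIOU".toList then [c, 'p', c] else [c]) := by
    rw [alt_toList]
    have : ∀ (l : List Char) (v : Char),
        PySem.Chars.replace l [v] [v, 'p', v]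
          = l.flatMap (fun c => if c = v then [v, 'p', v] else [c]) := fun l v => replace_single v _ l
    calc List.foldl (fun l v => PySem.Chars.replace l [v] [v, 'p', v]) palabra.toList "aeiouAEIOU".toList
        = List.foldl (fun l v => l.flatMap (fun c => if c = v then [v, 'p', v] else [c]))
            palabra.toList "aeiouAEIOU".toList := by
          apply PySem.List.foldl_congr_mem
          intro l v _
          exact this l v
      _ = _ := by
          refine chain_subst _ _ (by decide) (by decide)
  have h2 := congrArg String.ofList hB
  rw [String.ofList_toList] at h2
  simp only [List.nil_append]
  exact h2.symm
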